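-- pv_equiv track=rewrite | github.com/ajay-1110/Python-Coderbyte-Challenges | String Challenges/tripple_double.py | triple_and_double
-- ===== SOURCE A (Python) =====
-- def triple_and_double(num1, num2):
--     num1_str = str(num1)
--     num2_str = str(num2)
--     for digit in range(10):
--         triple_str = str(digit) * 3
--         double_str = str(digit) * 2
--         if triple_str in num1_str and double_str in num2_str:
--             return 1
--     return 0
-- ===== SOURCE B (Python) =====
-- def _runs(s, k):
--     """Set of characters that appear in some consecutive run of length >= k in s."""
--     res = set()
--     i = 0
--     n = len(s)
--     while i < n:
--         j = i + 1
--         while j < n and s[j] == s[i]: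
--             j += 1
--         if j - i >= k:
--             res.add(s[i])
--         i = j
--     return res
--
--
-- def triple_and_double(num1, num2):
--     return 1 if _runs(str(num1), 3) & _runs(str(num2), 2) else 0
-- ===== Notes on version B (the rewrite author's own statement) =====
-- stated objective: alternative
-- what changed: Replaced the ten substring searches ('ddd' in str(num1), 'dd' in str(num2) for each digit) by two single-pass run-length scans that collect the set of characters with a consecutive run of length >= 3 (resp. >= 2), returning 1 iff the two sets intersect.
import Mathlib
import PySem

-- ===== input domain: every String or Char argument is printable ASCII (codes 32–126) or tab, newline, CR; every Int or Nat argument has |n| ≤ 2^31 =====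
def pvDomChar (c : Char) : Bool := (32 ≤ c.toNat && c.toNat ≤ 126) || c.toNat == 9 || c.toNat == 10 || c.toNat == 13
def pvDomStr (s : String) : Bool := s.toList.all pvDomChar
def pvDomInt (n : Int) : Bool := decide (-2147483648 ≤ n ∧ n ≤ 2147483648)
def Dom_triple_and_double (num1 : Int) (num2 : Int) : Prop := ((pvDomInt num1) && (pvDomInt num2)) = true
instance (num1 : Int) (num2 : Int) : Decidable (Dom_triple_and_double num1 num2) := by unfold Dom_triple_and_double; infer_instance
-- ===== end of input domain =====

-- B replaces A's ten substring searches by two single-pass run scans collecting character sets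
-- and a set intersection; objective: simpler/alternative (not claimed faster).

-- ===== PORT A =====
-- the 'for digit in range(10)' loop with early return 1
def tadLoop (s1 s2 : List Char) : List Int → Int
  | [] => 0
  | d :: rest =>
    let ds := PySem.Int.toChars d
    if PySem.Chars.isIn (ds ++ ds ++ ds) s1 && PySem.Chars.isIn (ds ++ ds) s2 then 1
    else tadLoop s1 s2 rest

def triple_and_double (num1 : Int) (num2 : Int) : Int :=
  tadLoop (PySem.Int.toChars num1) (PySem.Int.toChars num2) (PySem.List.pyRange 0 10 1)

-- ===== PORT B =====
-- _runs(s, k): outer while walks run by run (inner while = takeWhile/dropWhile of the run)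
def runsAux (k : Nat) (s : List Char) (res : PySem.Set Char) : PySem.Set Char :=
  match s with
  | [] => res
  | c :: rest =>
    runsAux k (rest.dropWhile (fun x => x == c))
      (if k ≤ (rest.takeWhile (fun x => x == c)).length + 1 then PySem.Set.add res c else res)
termination_by s.length
decreasing_by
  simp only [List.length_cons]
  exact Nat.lt_succ_of_le (List.length_dropWhile_le _ _)

def triple_and_double_alt (num1 : Int) (num2 : Int) : Int :=
  let r1 := runsAux 3 (PySem.Int.toChars num1) PySem.Set.empty
  let r2 := runsAux 2 (PySem.Int.toChars num2) PySem.Set.empty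
  if (PySem.Set.inter r1 r2).isEmpty then 0 else 1

-- ===== PRECONDITION & SPEC =====
def Spec_triple_and_double (num1 : Int) (num2 : Int) (out : Int) : Prop := out = triple_and_double_alt num1 num2
instance (num1 : Int) (num2 : Int) (out : Int) : Decidable (Spec_triple_and_double num1 num2 out) := by unfold Spec_triple_and_double; infer_instance

-- ===== CLAIM (what is proved, stated in full; the proofs are below) =====
def Claim_equal_triple_and_double : Prop := ∀ (num1 : Int) (num2 : Int), Dom_triple_and_double num1 num2 → Spec_triple_and_double num1 num2 (triple_and_double num1 num2)

-- ===== LEMMAS AND PROOFS =====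

-- the ten decimal digit characters
def pvDigits : List Char := ['0','1','2','3','4','5','6','7','8','9']

-- A's loop returns 1 iff some listed digit passes both substring tests, else 0
lemma tadLoop_eq (s1 s2 : List Char) (ds : List Int) :
    tadLoop s1 s2 ds =
      if ds.any (fun d =>
          PySem.Chars.isIn (PySem.Int.toChars d ++ PySem.Int.toChars d ++ PySem.Int.toChars d) s1 &&
          PySem.Chars.isIn (PySem.Int.toChars d ++ PySem.Int.toChars d) s2) then 1 else 0 := by
  induction ds with
  | nil => simp [tadLoop]
  | cons d rest ih =>
    simp only [tadLoop, List.any_cons, ih]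
    by_cases hc : (PySem.Chars.isIn (PySem.Int.toChars d ++ PySem.Int.toChars d ++ PySem.Int.toChars d) s1 &&
        PySem.Chars.isIn (PySem.Int.toChars d ++ PySem.Int.toChars d) s2) = true
    · rw [if_pos hc]
      simp only [hc, Bool.true_or]
      simp
    · have hfc : (PySem.Chars.isIn (PySem.Int.toChars d ++ PySem.Int.toChars d ++ PySem.Int.toChars d) s1 &&
          PySem.Chars.isIn (PySem.Int.toChars d ++ PySem.Int.toChars d) s2) = false := by simpa using hc
      rw [if_neg hc]
      simp only [hfc, Bool.false_or]

-- a^j is a prefix of a^m ++ rem (rem not starting with a) iff j ≤ m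
lemma replicate_prefix_iff (a : Char) (rem : List Char)
    (hrem : ∀ x xs, rem = x :: xs → x ≠ a) :
    ∀ (j m : Nat), (List.replicate j a <+: List.replicate m a ++ rem ↔ j ≤ m) := by
  intro j
  induction j with
  | zero => intro m; simp
  | succ j ih =>
    intro m
    cases m with
    | zero =>
      simp only [List.replicate_zero, List.nil_append]
      constructor
      · intro h
        exfalso
        rcases rem with _ | ⟨x, xs⟩
        · have := h.length_le
          simp at this
        · rw [List.replicate_succ, List.cons_prefix_cons] at h
          exact hrem x xs rfl h.1.symm
      · omega
    | succ m =>
      rw [List.replicate_succ, List.replicate_succ, List.cons_append,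
        List.cons_prefix_cons]
      simp only [true_and, ih m]
      omega

-- a^k is an infix of a^m ++ rem (rem not starting with a, 1 ≤ k) iff it fits the run or lies in rem
lemma replicate_infix_append (a x : Char) (k : Nat) (hk : 1 ≤ k) (rem : List Char)
    (hrem : ∀ y ys, rem = y :: ys → y ≠ a) :
    ∀ m, (List.replicate k x <:+: List.replicate m a ++ rem ↔
        (x = a ∧ k ≤ m) ∨ List.replicate k x <:+: rem) := by
  intro m
  induction m with
  | zero =>
    simp only [List.replicate, List.nil_append]
    constructor
    · intro h; right; exact h
    · rintro (⟨_, hle⟩ | h)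
      · omega
      · exact h
  | succ m ih =>
    rw [List.replicate_succ, List.cons_append, List.infix_cons_iff]
    constructor
    · rintro (hpre | hinf)
      · rcases k with _ | k
        · omega
        · rw [List.replicate_succ, List.cons_prefix_cons] at hpre
          obtain ⟨hxa, hpre⟩ := hpre
          subst hxa
          have := (replicate_prefix_iff x rem hrem k m).mp hpre
          exact Or.inl ⟨rfl, by omega⟩
      · rcases ih.mp hinf with ⟨hxa, hle⟩ | h
        · exact Or.inl ⟨hxa, by omega⟩
        · exact Or.inr h
    · rintro (⟨hxa, hle⟩ | h)
      · subst hxa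
        left
        rcases k with _ | k
        · omega
        · rw [List.replicate_succ, List.cons_prefix_cons]
          exact ⟨rfl, (replicate_prefix_iff x rem hrem k m).mpr (by omega)⟩
      · exact Or.inr (ih.mpr (Or.inr h))

-- head of a dropWhile fails the predicate
lemma dropWhile_head_ne (c x : Char) (l xs : List Char)
    (h : l.dropWhile (fun y => y == c) = x :: xs) : x ≠ c := by
  have h0 : 0 < (l.dropWhile (fun y => y == c)).length := by simp [h]
  have hnot := List.dropWhile_get_zero_not (p := fun y => y == c) l h0
  intro hxc
  apply hnot
  have hget : (l.dropWhile (fun y => y == c)).get ⟨0, h0⟩ = x := by simp [h]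
  rw [hget, hxc]
  simp

-- B's run scan collects exactly the characters with a run of length ≥ k
lemma mem_runsAux (k : Nat) (hk : 1 ≤ k) :
    ∀ (s : List Char) (res : PySem.Set Char) (c : Char),
      c ∈ runsAux k s res ↔ c ∈ res ∨ List.replicate k c <:+: s := by
  intro s res
  induction s, res using runsAux.induct k with
  | case1 res =>
    intro c
    simp only [runsAux, List.infix_nil, List.replicate_eq_nil_iff]
    constructor
    · exact Or.inl
    · rintro (h | h)
      · exact h
      · omega
  | case2 res a rest ih =>
    intro c
    simp only [dite_eq_ite] at ih
    rw [runsAux, ih]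
    have htake : rest.takeWhile (fun x => x == a) =
        List.replicate (rest.takeWhile (fun x => x == a)).length a := by
      apply List.eq_replicate_of_mem
      intro b hb
      have := List.mem_takeWhile_imp hb
      simpa using this
    have hsplit : a :: rest =
        List.replicate ((rest.takeWhile (fun x => x == a)).length + 1) a ++
          rest.dropWhile (fun x => x == a) := by
      calc a :: rest = a :: (rest.takeWhile (fun x => x == a) ++ rest.dropWhile (fun x => x == a)) := by
            rw [List.takeWhile_append_dropWhile]
        _ = _ := by
            rw [Nat.add_comm, List.replicate_add]
            simp only [List.replicate_one, List.cons_append, List.nil_append]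
            congr 1
            conv_lhs => rw [htake]
    have hrem : ∀ y ys, rest.dropWhile (fun x => x == a) = y :: ys → y ≠ a := by
      intro y ys hy
      exact dropWhile_head_ne a y rest ys hy
    have hinfix : (List.replicate k c <:+: a :: rest) ↔
        ((c = a ∧ k ≤ (rest.takeWhile (fun x => x == a)).length + 1) ∨
          List.replicate k c <:+: rest.dropWhile (fun x => x == a)) := by
      rw [hsplit]
      exact replicate_infix_append a c k hk _ hrem _
    rw [hinfix]
    by_cases hcase : k ≤ (rest.takeWhile (fun x => x == a)).length + 1
    · simp only [hcase, if_true, PySem.Set.mem_add]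
      constructor
      · rintro ((h | h) | h)
        · exact Or.inl h
        · exact Or.inr (Or.inl ⟨h, trivial⟩)
        · exact Or.inr (Or.inr h)
      · rintro (h | (⟨hca, _⟩ | h))
        · exact Or.inl (Or.inl h)
        · exact Or.inl (Or.inr hca)
        · exact Or.inr h
    · simp only [hcase, if_false]
      constructor
      · rintro (h | h)
        · exact Or.inl h
        · exact Or.inr (Or.inr h)
      · rintro (h | (⟨_, hle⟩ | h))
        · exact Or.inl h
        · exact hle.elim
        · exact Or.inr h

-- every character of Nat.toDigitsCore is a decimal digit (or came from the accumulator)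
lemma mem_toDigitsCore (f : Nat) :
    ∀ (n : Nat) (acc : List Char) (c : Char), c ∈ Nat.toDigitsCore 10 f n acc →
      c ∈ acc ∨ c ∈ pvDigits := by
  induction f with
  | zero => intro n acc c h; exact Or.inl h
  | succ f ih =>
    intro n acc c h
    have hdig : Nat.digitChar (n % 10) ∈ pvDigits := by
      have h10 : n % 10 < 10 := Nat.mod_lt _ (by omega)
      interval_cases h' : n % 10 <;> simp [Nat.digitChar, pvDigits]
    rw [Nat.toDigitsCore] at h
    split at h
    · rcases List.mem_cons.mp h with h | h
      · exact Or.inr (h ▸ hdig)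
      · exact Or.inl h
    · rcases ih (n / 10) (Nat.digitChar (n % 10) :: acc) c h with h | h
      · rcases List.mem_cons.mp h with h | h
        · exact Or.inr (h ▸ hdig)
        · exact Or.inl h
      · exact Or.inr h

lemma mem_toDigits (n : Nat) (c : Char) (h : c ∈ Nat.toDigits 10 n) : c ∈ pvDigits := by
  rcases mem_toDigitsCore (n + 1) n [] c h with h | h
  · simp at h
  · exact h

-- a character with a doubled run in str(n) is a decimal digit
lemma double_run_digit (n : Int) (c : Char)
    (h : List.replicate 2 c <:+: PySem.Int.toChars n) : c ∈ pvDigits := by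
  by_contra hc
  have hcount : 2 ≤ (PySem.Int.toChars n).count c := by
    have := List.IsInfix.count_le c h
    simpa using this
  unfold PySem.Int.toChars at hcount
  split at hcount
  · rw [List.count_cons] at hcount
    have hzero : (Nat.toDigits 10 n.natAbs).count c = 0 :=
      List.count_eq_zero.mpr (fun hmem => hc (mem_toDigits _ _ hmem))
    rw [hzero] at hcount
    split at hcount <;> omega
  · have hmem : c ∈ Nat.toDigits 10 n.toNat := by
      have : 0 < (Nat.toDigits 10 n.toNat).count c := by omega
      exact List.count_pos_iff.mp this
    exact hc (mem_toDigits _ _ hmem)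

-- for each of the ten digits, str(digit) as a char list
lemma toChars_digit : ∀ d ∈ PySem.List.pyRange 0 10 1,
    ∃ c ∈ pvDigits, PySem.Int.toChars d = [c] := by
  intro d hd
  rw [PySem.List.mem_pyRange_one] at hd
  obtain ⟨h0, h10⟩ := hd
  interval_cases d
  · exact ⟨'0', by decide, by decide⟩
  · exact ⟨'1', by decide, by decide⟩
  · exact ⟨'2', by decide, by decide⟩
  · exact ⟨'3', by decide, by decide⟩
  · exact ⟨'4', by decide, by decide⟩
  · exact ⟨'5', by decide, by decide⟩
  · exact ⟨'6', by decide, by decide⟩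
  · exact ⟨'7', by decide, by decide⟩
  · exact ⟨'8', by decide, by decide⟩
  · exact ⟨'9', by decide, by decide⟩

-- each digit char is str(d) for some d in range(10)
lemma digit_toChars : ∀ c ∈ pvDigits,
    ∃ d ∈ PySem.List.pyRange 0 10 1, PySem.Int.toChars d = [c] := by
  intro c hc
  simp only [pvDigits, List.mem_cons, List.not_mem_nil, or_false] at hc
  rcases hc with h | h | h | h | h | h | h | h | h | h <;> subst h
  · exact ⟨0, by decide, by decide⟩
  · exact ⟨1, by decide, by decide⟩
  · exact ⟨2, by decide, by decide⟩
  · exact ⟨3, by decide, by decide⟩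
  · exact ⟨4, by decide, by decide⟩
  · exact ⟨5, by decide, by decide⟩
  · exact ⟨6, by decide, by decide⟩
  · exact ⟨7, by decide, by decide⟩
  · exact ⟨8, by decide, by decide⟩
  · exact ⟨9, by decide, by decide⟩

-- the two 1-conditions are equivalent
lemma main_iff (num1 num2 : Int) :
    ((PySem.List.pyRange 0 10 1).any (fun d =>
        PySem.Chars.isIn (PySem.Int.toChars d ++ PySem.Int.toChars d ++ PySem.Int.toChars d)
          (PySem.Int.toChars num1) &&
        PySem.Chars.isIn (PySem.Int.toChars d ++ PySem.Int.toChars d)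
          (PySem.Int.toChars num2)) = true) ↔
    ¬ ((PySem.Set.inter (runsAux 3 (PySem.Int.toChars num1) PySem.Set.empty)
        (runsAux 2 (PySem.Int.toChars num2) PySem.Set.empty)).isEmpty = true) := by
  rw [List.any_eq_true, List.isEmpty_iff]
  constructor
  · rintro ⟨d, hd, hcond⟩
    obtain ⟨c, _, hdc⟩ := toChars_digit d hd
    rw [hdc] at hcond
    rw [Bool.and_eq_true, PySem.Chars.isIn_iff_infix, PySem.Chars.isIn_iff_infix] at hcond
    have h1 : c ∈ runsAux 3 (PySem.Int.toChars num1) PySem.Set.empty := by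
      rw [mem_runsAux 3 (by omega)]
      right
      simpa [List.replicate] using hcond.1
    have h2 : c ∈ runsAux 2 (PySem.Int.toChars num2) PySem.Set.empty := by
      rw [mem_runsAux 2 (by omega)]
      right
      simpa [List.replicate] using hcond.2
    intro hempty
    have : c ∈ PySem.Set.inter (runsAux 3 (PySem.Int.toChars num1) PySem.Set.empty)
        (runsAux 2 (PySem.Int.toChars num2) PySem.Set.empty) :=
      (PySem.Set.mem_inter _ _ c).mpr ⟨h1, h2⟩
    rw [hempty] at this
    simp at this
  · intro hne
    obtain ⟨c, hc⟩ := List.exists_mem_of_ne_nil _ (fun h => hne h)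
    obtain ⟨h1, h2⟩ := (PySem.Set.mem_inter _ _ c).mp hc
    rw [mem_runsAux 3 (by omega)] at h1
    rw [mem_runsAux 2 (by omega)] at h2
    rcases h1 with h1 | h1
    · simp [PySem.Set.empty] at h1
    rcases h2 with h2 | h2
    · simp [PySem.Set.empty] at h2
    have hdigit : c ∈ pvDigits := double_run_digit num2 c h2
    obtain ⟨d, hd, hdc⟩ := digit_toChars c hdigit
    refine ⟨d, hd, ?_⟩
    rw [hdc, Bool.and_eq_true, PySem.Chars.isIn_iff_infix, PySem.Chars.isIn_iff_infix]
    constructor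
    · simpa [List.replicate] using h1
    · simpa [List.replicate] using h2

-- ===== VERDICT (by name: the statement is the Claim_ definition above) =====
theorem triple_and_double_spec : Claim_equal_triple_and_double := by
  intro num1 num2 _
  unfold Spec_triple_and_double
  simp only [triple_and_double, triple_and_double_alt]
  rw [tadLoop_eq]
  have h := main_iff num1 num2
  cases hQ : (PySem.Set.inter (runsAux 3 (PySem.Int.toChars num1) PySem.Set.empty)
      (runsAux 2 (PySem.Int.toChars num2) PySem.Set.empty)).isEmpty with
  | true =>
    have hP : ¬ ((PySem.List.pyRange 0 10 1).any (fun d =>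
        PySem.Chars.isIn (PySem.Int.toChars d ++ PySem.Int.toChars d ++ PySem.Int.toChars d)
          (PySem.Int.toChars num1) &&
        PySem.Chars.isIn (PySem.Int.toChars d ++ PySem.Int.toChars d)
          (PySem.Int.toChars num2)) = true) := fun hp => (h.mp hp) hQ
    rw [if_neg hP]
    simp
  | false =>
    have hP := h.mpr (by rw [hQ]; simp)
    rw [if_pos hP]
    simp
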